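-- pv_equiv track=rewrite | github.com/nermadie/CodeForces_Solutions | CodeforcesRound967Div2/prob01.py | solve
-- ===== SOURCE A (Python) =====
-- def solve(n, a):
--     appear_dict = {}
--     for i in a:
--         appear_dict.setdefault(i, 0)
--         appear_dict[i] += 1
--     appear_list = list(appear_dict.items())
--     appear_list.sort(key=lambda x: x[1])
--     return n - appear_list[-1][1]
-- ===== SOURCE B (Python) =====
-- def solve(n, a):
--     # One pass: maintain counts and the running maximum count; no sort, no
--     # second scan over the frequency table.
--     counts = {}
--     best = 0
--     for x in a:
--         c = counts.get(x, 0) + 1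
--         counts[x] = c
--         if c > best:
--             best = c
--     return n - best
-- ===== Notes on version B (the rewrite author's own statement) =====
-- stated objective: faster
-- what changed: B keeps a running maximum count inside the single counting pass instead of building the frequency dict, materialising and sorting its items by count, and indexing the last pair.
import Mathlib
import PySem

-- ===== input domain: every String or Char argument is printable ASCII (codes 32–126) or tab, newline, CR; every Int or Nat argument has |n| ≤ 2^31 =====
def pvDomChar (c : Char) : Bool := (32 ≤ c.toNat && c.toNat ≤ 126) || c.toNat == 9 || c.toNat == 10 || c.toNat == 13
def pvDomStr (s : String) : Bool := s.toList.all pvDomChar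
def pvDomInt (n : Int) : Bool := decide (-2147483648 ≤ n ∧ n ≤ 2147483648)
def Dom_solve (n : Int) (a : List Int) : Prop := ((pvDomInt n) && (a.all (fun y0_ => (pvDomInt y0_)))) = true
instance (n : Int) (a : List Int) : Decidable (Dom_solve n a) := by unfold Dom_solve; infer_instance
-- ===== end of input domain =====

-- B replaces A's sort-the-frequency-pairs-and-take-the-last step by a running maximum
-- maintained inside the single counting pass (objective: faster, one pass, no sort).

-- ===== PORT A =====
def solve (n : Int) (a : List Int) : Int :=
  let appear_dict := a.foldl (fun d i =>
      let d := d.setdefault i 0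
      d.insert i (d.getD i 0 + 1)) PySem.Dict.empty
  let appear_list := PySem.List.sorted appear_dict.items (fun x => x.2)
  match PySem.List.pyGet? appear_list (-1) with
  | some p => n - p.2
  | none => 0   -- appear_list[-1] raises IndexError here (empty a); excluded by Pre_solve

-- ===== PORT B =====
def solve_alt (n : Int) (a : List Int) : Int :=
  let st := a.foldl (fun (st : PySem.Dict Int Int × Int) x =>
      let c := st.1.getD x 0 + 1
      (st.1.insert x c, if c > st.2 then c else st.2)) (PySem.Dict.empty, 0)
  n - st.2

-- ===== PRECONDITION & SPEC =====
-- Pre_ excludes only the empty list, on which A raises IndexError.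
def Pre_solve (n : Int) (a : List Int) : Prop := a ≠ []
instance (n : Int) (a : List Int) : Decidable (Pre_solve n a) := by unfold Pre_solve; infer_instance
def pvWitness_solve : Int × List Int := (3, [1, 1, 2])

def Spec_solve (n : Int) (a : List Int) (out : Int) : Prop := out = solve_alt n a
instance (n : Int) (a : List Int) (out : Int) : Decidable (Spec_solve n a out) := by unfold Spec_solve; infer_instance

-- ===== CLAIM (what is proved, stated in full; the proofs are below) =====
def Claim_equal_solve : Prop := ∀ (n : Int) (a : List Int), Dom_solve n a → Pre_solve n a → Spec_solve n a (solve n a)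

-- ===== LEMMAS AND PROOFS =====

-- max of the multiset of frequencies of p (0 for empty p)
def Mx (p : List Int) : Int := (p.map (fun x => (p.count x : Int))).foldl max 0

lemma foldl_max_le (l : List Int) (b B : Int) (hb : b ≤ B) (h : ∀ x ∈ l, x ≤ B) :
    l.foldl max b ≤ B := by
  induction l generalizing b with
  | nil => simpa using hb
  | cons c t ih =>
      simp only [List.foldl_cons]
      exact ih (max b c) (max_le hb (h c (by simp))) (fun x hx => h x (by simp [hx]))

lemma Mx_nonneg (p : List Int) : 0 ≤ Mx p := (PySem.List.le_foldl_max _ _).1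

lemma count_le_Mx (p : List Int) (y : Int) (hy : y ∈ p) : (p.count y : Int) ≤ Mx p :=
  (PySem.List.le_foldl_max _ _).2 _ (List.mem_map.mpr ⟨y, hy, rfl⟩)

lemma Mx_le (p : List Int) (B : Int) (h0 : 0 ≤ B) (h : ∀ y ∈ p, (p.count y : Int) ≤ B) :
    Mx p ≤ B := by
  refine foldl_max_le _ _ _ h0 ?_
  intro x hx
  rcases List.mem_map.mp hx with ⟨y, hy, rfl⟩
  exact h y hy

lemma Mx_append (p : List Int) (x : Int) :
    Mx (p ++ [x]) = max (Mx p) ((p.count x : Int) + 1) := by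
  have hcnt : ∀ y, ((p ++ [x]).count y : Int)
      = (p.count y : Int) + (if y = x then 1 else 0) := by
    intro y
    rw [List.count_append]
    simp [List.count_singleton]
    split_ifs <;> simp_all
  apply le_antisymm
  · refine Mx_le _ _ (le_trans (by positivity) (le_max_right _ _)) ?_
    intro y hy
    rw [hcnt y]
    by_cases hyx : y = x
    · subst hyx; exact le_trans (by simp) (le_max_right _ _)
    · have hyp : y ∈ p := by
        rcases List.mem_append.mp hy with h | h
        · exact h
        · simp at h; exact absurd h hyx
      simp only [hyx, if_false, add_zero]
      exact le_trans (count_le_Mx p y hyp) (le_max_left _ _)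
  · apply max_le
    · refine Mx_le _ _ (Mx_nonneg _) ?_
      intro y hy
      have h1 : ((p ++ [x]).count y : Int) ≤ Mx (p ++ [x]) :=
        count_le_Mx _ y (List.mem_append.mpr (Or.inl hy))
      have h2 : (p.count y : Int) ≤ ((p ++ [x]).count y : Int) := by
        rw [hcnt y]; split_ifs <;> omega
      exact le_trans h2 h1
    · have hx' : x ∈ p ++ [x] := List.mem_append.mpr (Or.inr (by simp))
      have := count_le_Mx (p ++ [x]) x hx'
      rwa [hcnt x, if_pos rfl] at this

-- A's loop body (setdefault then increment) is the plain counting insert.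
lemma stepA_eq (d : PySem.Dict Int Int) (i : Int) :
    (let d' := d.setdefault i 0; d'.insert i (d'.getD i 0 + 1))
      = d.insert i (d.getD i 0 + 1) := by
  by_cases h : d.contains i = true
  · simp only [PySem.Dict.setdefault_of_contains d 0 h]
  · have h' : d.contains i = false := by simpa using h
    simp only [PySem.Dict.setdefault_of_not_contains d 0 h',
      PySem.Dict.getD_insert_self, PySem.Dict.insert_insert_self,
      PySem.Dict.getD_of_not_contains d 0 h']

lemma A_dict (a : List Int) :
    a.foldl (fun d i =>
      let d := d.setdefault i 0
      d.insert i (d.getD i 0 + 1)) PySem.Dict.empty = PySem.Dict.counter a := by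
  have hfun : (fun (d : PySem.Dict Int Int) i =>
      let d := d.setdefault i 0
      d.insert i (d.getD i 0 + 1)) = (fun d i => d.insert i (d.getD i 0 + 1)) :=
    funext fun d => funext fun i => stepA_eq d i
  rw [hfun, PySem.Dict.foldl_insert_getD_add_one_eq_counter]

lemma pyGet_neg_one {α : Type} (l : List α) (h : l ≠ []) :
    PySem.List.pyGet? l (-1) = some (l.getLast h) := by
  have hn : 0 < l.length := List.length_pos_iff.mpr h
  simp only [PySem.List.pyGet?, PySem.List.pyIdx?]
  have h1 : ¬ (0 : Int) ≤ -1 := by omega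
  have h2 : -(l.length : Int) ≤ -1 := by omega
  rw [if_neg h1, if_pos h2]
  simp only [Option.bind_some]
  have : l.length - (-(-1 : Int)).toNat = l.length - 1 := by norm_num
  rw [this, ← List.getLast?_eq_getElem?]
  exact List.getLast?_eq_getLast h

lemma pairwise_getLast {α : Type} (R : α → α → Prop) (l : List α)
    (hp : l.Pairwise R) (h : l ≠ []) :
    ∀ y ∈ l, y = l.getLast h ∨ R y (l.getLast h) := by
  induction l with
  | nil => exact absurd rfl h
  | cons a t ih =>
      rcases List.pairwise_cons.mp hp with ⟨ha, ht⟩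
      intro y hy
      by_cases hte : t = []
      · subst hte
        simp at hy
        subst hy
        left; rfl
      · rw [List.getLast_cons hte]
        rcases List.mem_cons.mp hy with rfl | hyt
        · right; exact ha _ (List.getLast_mem hte)
        · exact ih ht hte y hyt

lemma A_result (n : Int) (a : List Int) (ha : a ≠ []) : solve n a = n - Mx a := by
  unfold solve
  simp only [A_dict]
  set items := (PySem.Dict.counter a).items with hitems
  have hitems' : items = (PySem.Set.ofList a).map (fun k => (k, (a.count k : Int))) := by
    rw [hitems, PySem.Dict.items_counter]
  have hne : items ≠ [] := by
    rw [hitems']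
    intro hcontra
    rcases List.exists_mem_of_ne_nil a ha with ⟨x, hx⟩
    have : x ∈ PySem.Set.ofList a := (PySem.Set.mem_ofList a x).mpr hx
    rcases List.map_eq_nil_iff.mp hcontra with h
    simp [h] at this
  set s := PySem.List.sorted items (fun x => x.2) with hs
  have hsne : s ≠ [] := by
    rw [hs]
    intro hc
    exact hne ((PySem.List.sorted_eq_nil_iff _ _ _).mp hc)
  rw [pyGet_neg_one s hsne]
  set last := s.getLast hsne with hlast
  -- last ∈ items, so last.2 is some count of an element of a
  have hmem : last ∈ items := by
    rw [← PySem.List.mem_sorted items (fun x => x.2) false]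
    exact List.getLast_mem hsne
  rcases List.mem_map.mp (by rwa [hitems'] at hmem) with ⟨k, hk, hkeq⟩
  have hka : k ∈ a := (PySem.Set.mem_ofList a k).mp hk
  have hlast2 : last.2 = (a.count k : Int) := by rw [← hkeq]
  -- last.2 dominates every count
  have hdom : ∀ y ∈ a, (a.count y : Int) ≤ last.2 := by
    intro y hy
    have hyi : (y, (a.count y : Int)) ∈ items := by
      rw [hitems']
      exact List.mem_map.mpr ⟨y, (PySem.Set.mem_ofList a y).mpr hy, rfl⟩
    have hys : (y, (a.count y : Int)) ∈ s := by
      rw [hs, PySem.List.mem_sorted]; exact hyi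
    have hpw := PySem.List.sorted_pairwise items (fun x => x.2)
    rcases pairwise_getLast _ s (by rw [hs]; exact hpw) hsne _ hys with heq | hle
    · rw [hlast, ← heq]
    · exact hle
  have hM : last.2 = Mx a := by
    apply le_antisymm
    · rw [hlast2]; exact count_le_Mx a k hka
    · exact Mx_le a last.2 (by rw [hlast2]; positivity) hdom
  show n - last.2 = n - Mx a
  rw [hM]

lemma B_fold (p : List Int) :
    p.foldl (fun (st : PySem.Dict Int Int × Int) x =>
      let c := st.1.getD x 0 + 1
      (st.1.insert x c, if c > st.2 then c else st.2)) (PySem.Dict.empty, 0)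
    = (PySem.Dict.counter p, Mx p) := by
  induction p using List.reverseRecOn with
  | nil => rfl
  | append_singleton p x ih =>
      rw [List.foldl_append, ih]
      simp only [List.foldl_cons, List.foldl_nil]
      refine Prod.ext ?_ ?_
      · show (PySem.Dict.counter p).insert x ((PySem.Dict.counter p).getD x 0 + 1)
            = PySem.Dict.counter (p ++ [x])
        rw [PySem.Dict.counter_append_singleton]
        rfl
      · show (if (PySem.Dict.counter p).getD x 0 + 1 > Mx p
              then (PySem.Dict.counter p).getD x 0 + 1 else Mx p) = Mx (p ++ [x])
        rw [PySem.Dict.getD_counter, Mx_append]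
        by_cases h : (p.count x : Int) + 1 ≤ Mx p
        · rw [if_neg (by omega), max_eq_left h]
        · rw [if_pos (by omega), max_eq_right (by omega)]

lemma B_result (n : Int) (a : List Int) : solve_alt n a = n - Mx a := by
  unfold solve_alt
  simp only [B_fold]

-- ===== VERDICT (by name: the statement is the Claim_ definition above) =====
theorem solve_spec : Claim_equal_solve := by
  intro n a _ hpre
  unfold Spec_solve
  rw [A_result n a hpre, B_result n a]
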